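-- pv_equiv track=rewrite | github.com/ashleyprado/Association-Mining-AshleyPrado | src/preprocessing/cleaner.py | preprocess_transactions
-- ===== SOURCE A (Python) =====
-- def preprocess_transactions(raw_transactions, valid_products):
--     """
--     Apply all required cleaning steps:
--       - Empty transactions removal
--       - Single-item transactions removal
--       - Duplicate items removal within a transaction
--       - Product name standardization (lowercase, stripped)
--       - Invalid product removal (not in valid_products)
--
--     Returns:
--       cleaned_transactions: list[set[str]]
--       report: dict with statistics for the report
--     """
--     report = {
--         "total_transactions_before": len(raw_transactions),
--         "empty_transactions": 0,
--         "single_item_transactions": 0,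
--         "duplicate_items_instances": 0,
--         "invalid_items_instances": 0,
--     }
--
--     cleaned_transactions = []
--
--     for items in raw_transactions:
--         standardized = []
--         seen = set()
--
--         for item in items:
--             item_clean = str(item).strip().lower()
--             if not item_clean:
--                 continue
--
--             # Invalid product
--             if item_clean not in valid_products:
--                 report["invalid_items_instances"] += 1
--                 continue
--
--             # Duplicate within transaction
--             if item_clean in seen:
--                 report["duplicate_items_instances"] += 1
--                 continue
--
--             seen.add(item_clean)
--             standardized.append(item_clean)
--
--         # Empty after cleaning
--         if len(standardized) == 0:
--             report["empty_transactions"] += 1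
--             continue
--
--         # Single-item transactions are removed
--         if len(standardized) == 1:
--             report["single_item_transactions"] += 1
--             continue
--
--         cleaned_transactions.append(set(standardized))
--
--     report["total_transactions_after"] = len(cleaned_transactions)
--     report["total_items_after"] = sum(len(t) for t in cleaned_transactions)
--     all_items = set().union(*cleaned_transactions) if cleaned_transactions else set()
--     report["unique_products_after"] = len(all_items)
--
--     return cleaned_transactions, report
-- ===== SOURCE B (Python) =====
-- def preprocess_transactions(raw_transactions, valid_products):
--     """Stateless staged pipeline over the whole dataset: global map/filter passes,
--     with every statistic derived by counting/length arithmetic on intermediate lists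
--     (no per-item branch ladder, no mutable counters, no per-transaction state)."""
--     norm = [[c for c in (str(i).strip().lower() for i in t) if c]
--             for t in raw_transactions]
--     valid_lists = [[x for x in t if x in valid_products] for t in norm]
--     distinct = [list(dict.fromkeys(t)) for t in valid_lists]
--     lens = [len(d) for d in distinct]
--     cleaned_transactions = [set(d) for d in distinct if len(d) >= 2]
--     report = {
--         "total_transactions_before": len(raw_transactions),
--         "empty_transactions": lens.count(0),
--         "single_item_transactions": lens.count(1),
--         "duplicate_items_instances": sum(map(len, valid_lists)) - sum(lens),
--         "invalid_items_instances": sum(map(len, norm)) - sum(map(len, valid_lists)),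
--         "total_transactions_after": len(cleaned_transactions),
--         "total_items_after": sum(map(len, cleaned_transactions)),
--         "unique_products_after": len({x for t in cleaned_transactions for x in t}),
--     }
--     return cleaned_transactions, report
-- ===== Notes on version B (the rewrite author's own statement) =====
-- stated objective: alternative
-- what changed: A's single stateful per-item loop (mutable seen-set, branch ladder, dict-counter increments, per-transaction classification inline) is replaced by a stateless staged pipeline of whole-dataset passes: normalize all transactions, filter against valid_products, ordered-dedup each, then derive every statistic afterwards by counting lengths (lens.count(0)/count(1), sums of lengths) and select the kept transactions by a final filter.
import Mathlib
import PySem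

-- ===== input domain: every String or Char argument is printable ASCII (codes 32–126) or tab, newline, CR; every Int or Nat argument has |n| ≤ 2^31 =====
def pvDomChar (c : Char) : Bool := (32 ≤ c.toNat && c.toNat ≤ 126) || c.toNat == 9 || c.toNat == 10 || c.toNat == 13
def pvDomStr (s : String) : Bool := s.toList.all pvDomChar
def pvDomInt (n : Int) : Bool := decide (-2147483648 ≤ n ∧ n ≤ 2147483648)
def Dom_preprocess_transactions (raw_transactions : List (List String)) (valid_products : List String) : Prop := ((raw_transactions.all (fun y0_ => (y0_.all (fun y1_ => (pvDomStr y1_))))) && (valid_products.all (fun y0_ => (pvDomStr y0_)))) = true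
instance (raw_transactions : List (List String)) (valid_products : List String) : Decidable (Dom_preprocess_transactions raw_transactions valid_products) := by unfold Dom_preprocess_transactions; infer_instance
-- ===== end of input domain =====

-- B replaces A's single stateful per-item loop (seen-set, branch ladder, dict-counter
-- increments) by a stateless staged pipeline of whole-dataset passes whose statistics
-- are derived afterwards by counting and length arithmetic (objective: alternative).
-- ===== PORT A =====
def pvCleanA (item : String) : String := PySem.Str.lower (PySem.Str.strip item)

def pvInnerA (valid_products : List String) (st : PySem.Dict String Int × PySem.Set String × List String) (item : String) : PySem.Dict String Int × PySem.Set String × List String :=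
  let item_clean := pvCleanA item
  if item_clean = "" then st
  else if item_clean ∉ valid_products then
    (st.1.insert "invalid_items_instances" (st.1.getD "invalid_items_instances" 0 + 1), st.2.1, st.2.2)
  else if item_clean ∈ st.2.1 then
    (st.1.insert "duplicate_items_instances" (st.1.getD "duplicate_items_instances" 0 + 1), st.2.1, st.2.2)
  else (st.1, PySem.Set.add st.2.1 item_clean, st.2.2 ++ [item_clean])

def pvOuterA (valid_products : List String) (st : PySem.Dict String Int × List (List String)) (items : List String) : PySem.Dict String Int × List (List String) :=
  let r := items.foldl (pvInnerA valid_products) (st.1, PySem.Set.empty, [])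
  if r.2.2.length = 0 then
    (r.1.insert "empty_transactions" (r.1.getD "empty_transactions" 0 + 1), st.2)
  else if r.2.2.length = 1 then
    (r.1.insert "single_item_transactions" (r.1.getD "single_item_transactions" 0 + 1), st.2)
  else (r.1, st.2 ++ [PySem.Set.ofList r.2.2])

def preprocess_transactions (raw_transactions : List (List String)) (valid_products : List String) : List (List String) × (List (String × Int)) :=
  let report0 : PySem.Dict String Int :=
    ((((PySem.Dict.empty.insert "total_transactions_before" (raw_transactions.length : Int)).insert "empty_transactions" 0).insert "single_item_transactions" 0).insert "duplicate_items_instances" 0).insert "invalid_items_instances" 0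
  let r := raw_transactions.foldl (pvOuterA valid_products) (report0, [])
  let cleaned_transactions := r.2
  let report1 := r.1.insert "total_transactions_after" (cleaned_transactions.length : Int)
  let report2 := report1.insert "total_items_after" ((cleaned_transactions.map (fun t => (t.length : Int))).sum)
  let all_items : PySem.Set String :=
    if cleaned_transactions = [] then PySem.Set.empty
    else cleaned_transactions.foldl (fun s t => PySem.Set.union s t) PySem.Set.empty
  let report3 := report2.insert "unique_products_after" (all_items.length : Int)
  (cleaned_transactions, report3.items)

-- ===== PORT B =====
def preprocess_transactions_alt (raw_transactions : List (List String)) (valid_products : List String) : List (List String) × (List (String × Int)) :=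
  let norm := raw_transactions.map (fun t => (t.map (fun i => PySem.Str.lower (PySem.Str.strip i))).filter (fun c => c ≠ ""))
  let valid_lists := norm.map (fun t => t.filter (fun x => x ∈ valid_products))
  let distinct := valid_lists.map PySem.List.dedup
  let lens := distinct.map (fun d => (d.length : Int))
  let cleaned_transactions := (distinct.filter (fun d => 2 ≤ d.length)).map (fun d => PySem.Set.ofList d)
  (cleaned_transactions,
   [("total_transactions_before", (raw_transactions.length : Int)),
    ("empty_transactions", (PySem.List.count lens 0 : Int)),
    ("single_item_transactions", (PySem.List.count lens 1 : Int)),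
    ("duplicate_items_instances", (valid_lists.map (fun t => (t.length : Int))).sum - lens.sum),
    ("invalid_items_instances", (norm.map (fun t => (t.length : Int))).sum - (valid_lists.map (fun t => (t.length : Int))).sum),
    ("total_transactions_after", (cleaned_transactions.length : Int)),
    ("total_items_after", (cleaned_transactions.map (fun t => (t.length : Int))).sum),
    ("unique_products_after", ((PySem.Set.ofList cleaned_transactions.flatten).length : Int))])

-- ===== PRECONDITION & SPEC =====
def Spec_preprocess_transactions (raw_transactions : List (List String)) (valid_products : List String) (out : List (List String) × (List (String × Int))) : Prop := out = preprocess_transactions_alt raw_transactions valid_products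
instance (raw_transactions : List (List String)) (valid_products : List String) (out : List (List String) × (List (String × Int))) : Decidable (Spec_preprocess_transactions raw_transactions valid_products out) := by unfold Spec_preprocess_transactions; infer_instance

-- ===== CLAIM (what is proved, stated in full; the proofs are below) =====
def Claim_equal_preprocess_transactions : Prop := ∀ (raw_transactions : List (List String)) (valid_products : List String), Dom_preprocess_transactions raw_transactions valid_products → Spec_preprocess_transactions raw_transactions valid_products (preprocess_transactions raw_transactions valid_products)

-- ===== LEMMAS AND PROOFS =====
-- the report dict of A always has this shape (5 fixed keys, then 3 appended at the end)
def mkRep (n e s dp inv : Int) : PySem.Dict String Int :=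
  PySem.Dict.mk [("total_transactions_before", n), ("empty_transactions", e), ("single_item_transactions", s), ("duplicate_items_instances", dp), ("invalid_items_instances", inv)]

-- B's per-transaction quantities
def pvCs (items : List String) : List String := (items.map pvCleanA).filter (fun c => c ≠ "")
def pvVs (valid_products : List String) (items : List String) : List String := (pvCs items).filter (fun c => c ∈ valid_products)
def pvDs (valid_products : List String) (items : List String) : List String := PySem.List.dedup (pvVs valid_products items)

lemma pvCleanA_eq : pvCleanA = fun i => PySem.Str.lower (PySem.Str.strip i) := rfl

lemma mkRep_insert_inv (n e s dp inv v : Int) : (mkRep n e s dp inv).insert "invalid_items_instances" v = mkRep n e s dp v := rfl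
lemma mkRep_insert_dup (n e s dp inv v : Int) : (mkRep n e s dp inv).insert "duplicate_items_instances" v = mkRep n e s v inv := rfl
lemma mkRep_insert_empty (n e s dp inv v : Int) : (mkRep n e s dp inv).insert "empty_transactions" v = mkRep n v s dp inv := rfl
lemma mkRep_insert_single (n e s dp inv v : Int) : (mkRep n e s dp inv).insert "single_item_transactions" v = mkRep n e v dp inv := rfl
lemma mkRep_getD_inv (n e s dp inv : Int) : (mkRep n e s dp inv).getD "invalid_items_instances" 0 = inv := rfl
lemma mkRep_getD_dup (n e s dp inv : Int) : (mkRep n e s dp inv).getD "duplicate_items_instances" 0 = dp := rfl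
lemma mkRep_getD_empty (n e s dp inv : Int) : (mkRep n e s dp inv).getD "empty_transactions" 0 = e := rfl
lemma mkRep_getD_single (n e s dp inv : Int) : (mkRep n e s dp inv).getD "single_item_transactions" 0 = s := rfl

lemma innerA_char (valid : List String) (items : List String) : ∀ (n e s dp inv : Int) (st : List String),
    items.foldl (pvInnerA valid) (mkRep n e s dp inv, st, st) =
      (mkRep n e s
        (dp + (((pvVs valid items).length : Int) - (((PySem.Set.update st (pvVs valid items)).length : Int) - (st.length : Int))))
        (inv + (((pvCs items).length : Int) - ((pvVs valid items).length : Int))),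
       PySem.Set.update st (pvVs valid items), PySem.Set.update st (pvVs valid items)) := by
  induction items with
  | nil =>
    intro n e s dp inv st
    simp [pvCs, pvVs, PySem.Set.update]
  | cons x xs ih =>
    intro n e s dp inv st
    by_cases h0 : pvCleanA x = ""
    · have hcs : pvCs (x :: xs) = pvCs xs := by simp [pvCs, h0]
      have hvs : pvVs valid (x :: xs) = pvVs valid xs := by simp [pvVs, hcs]
      simp only [List.foldl_cons, pvInnerA, h0, hcs, hvs]
      rw [if_pos trivial]
      exact ih n e s dp inv st
    · have hcs : pvCs (x :: xs) = pvCleanA x :: pvCs xs := by simp [pvCs, h0]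
      by_cases h1 : pvCleanA x ∈ valid
      · have hvs : pvVs valid (x :: xs) = pvCleanA x :: pvVs valid xs := by simp [pvVs, hcs, h1]
        by_cases h2 : pvCleanA x ∈ st
        · have hadd : PySem.Set.add st (pvCleanA x) = st := by simp [PySem.Set.add, h2]
          simp only [List.foldl_cons, pvInnerA]
          rw [if_neg h0, if_neg (by simpa using h1), if_pos h2, mkRep_getD_dup, mkRep_insert_dup]
          rw [ih n e s (dp + 1) inv st, hcs, hvs, PySem.Set.update_cons, hadd]
          simp only [mkRep, Prod.mk.injEq, PySem.Dict.mk.injEq, List.cons.injEq, List.length_cons, Nat.cast_add, Nat.cast_one, and_true, true_and]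
          omega
        · have hadd : PySem.Set.add st (pvCleanA x) = st ++ [pvCleanA x] := by simp [PySem.Set.add, h2]
          simp only [List.foldl_cons, pvInnerA]
          rw [if_neg h0, if_neg (by simpa using h1), if_neg h2, hadd]
          rw [ih n e s dp inv (st ++ [pvCleanA x]), hcs, hvs, PySem.Set.update_cons, hadd]
          simp only [mkRep, Prod.mk.injEq, PySem.Dict.mk.injEq, List.cons.injEq, List.length_cons, List.length_append, List.length_nil, Nat.cast_add, Nat.cast_one, and_true, true_and]
          omega
      · have hvs : pvVs valid (x :: xs) = pvVs valid xs := by simp [pvVs, hcs, h1]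
        simp only [List.foldl_cons, pvInnerA]
        rw [if_neg h0, if_pos (by simpa using h1), mkRep_getD_inv, mkRep_insert_inv]
        rw [ih n e s dp (inv + 1) st, hvs, hcs]
        simp only [mkRep, Prod.mk.injEq, PySem.Dict.mk.injEq, List.cons.injEq, List.length_cons, Nat.cast_add, Nat.cast_one, and_true, true_and]
        omega

-- A's body on one transaction, expressed through B's staged per-transaction quantities
lemma outerA_step (valid : List String) (items : List String) (n e s dp inv : Int) (acc : List (List String)) :
    pvOuterA valid (mkRep n e s dp inv, acc) items =
      (mkRep n (e + if (pvDs valid items).length = 0 then 1 else 0)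
        (s + if (pvDs valid items).length = 1 then 1 else 0)
        (dp + (((pvVs valid items).length : Int) - ((pvDs valid items).length : Int)))
        (inv + (((pvCs items).length : Int) - ((pvVs valid items).length : Int))),
       acc ++ if 2 ≤ (pvDs valid items).length then [PySem.Set.ofList (pvDs valid items)] else []) := by
  unfold pvOuterA
  rw [show ((mkRep n e s dp inv, acc).1, PySem.Set.empty, ([] : List String)) = (mkRep n e s dp inv, ([] : List String), ([] : List String)) from rfl]
  rw [innerA_char valid items n e s dp inv []]
  have hupd : PySem.Set.update ([] : List String) (pvVs valid items) = pvDs valid items := by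
    rw [PySem.Set.update_nil_left]; rfl
  simp only [hupd, List.length_nil, Nat.cast_zero, sub_zero]
  by_cases h0 : (pvDs valid items).length = 0
  · rw [if_pos h0, mkRep_getD_empty, mkRep_insert_empty, if_pos h0]
    rw [if_neg (by omega), if_neg (by omega)]
    simp
  · by_cases h1 : (pvDs valid items).length = 1
    · rw [if_neg h0, if_pos h1, mkRep_getD_single, mkRep_insert_single, if_neg h0, if_pos h1]
      rw [if_neg (by omega)]
      simp
    · rw [if_neg h0, if_neg h1, if_neg h0, if_neg h1, if_pos (by omega)]
      simp

-- A's whole fold, expressed through B's staged whole-dataset quantities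
lemma outerA_char (valid : List String) (raws : List (List String)) : ∀ (n e s dp inv : Int) (acc : List (List String)),
    raws.foldl (pvOuterA valid) (mkRep n e s dp inv, acc) =
      (mkRep n
        (e + (((raws.map (fun t => ((pvDs valid t).length : Int))).count 0 : Int)))
        (s + (((raws.map (fun t => ((pvDs valid t).length : Int))).count 1 : Int)))
        (dp + ((raws.map (fun t => ((pvVs valid t).length : Int))).sum - (raws.map (fun t => ((pvDs valid t).length : Int))).sum))
        (inv + ((raws.map (fun t => ((pvCs t).length : Int))).sum - (raws.map (fun t => ((pvVs valid t).length : Int))).sum)),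
       acc ++ ((raws.map (pvDs valid)).filter (fun d => 2 ≤ d.length)).map (fun d => PySem.Set.ofList d)) := by
  induction raws with
  | nil => intro n e s dp inv acc; simp
  | cons t ts ih =>
    intro n e s dp inv acc
    rw [List.foldl_cons, outerA_step, ih]
    have hc0 : ∀ (l : List Int) (x v : Int), (x :: l).count v = l.count v + (if x = v then 1 else 0) := by
      intro l x v; rw [List.count_cons]; simp [beq_iff_eq]
    simp only [List.map_cons, List.sum_cons, List.filter_cons, hc0, mkRep, Prod.mk.injEq, PySem.Dict.mk.injEq, List.cons.injEq, and_true, true_and]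
    constructor
    · refine ⟨?_, ?_, by ring, by ring⟩
      · push_cast
        have : ((((pvDs valid t).length : Int) = 0) ↔ (pvDs valid t).length = 0) := by omega
        split_ifs with h h' h'
        all_goals simp_all
        all_goals ring_nf
      · have : ((((pvDs valid t).length : Int) = 1) ↔ (pvDs valid t).length = 1) := by omega
        push_cast
        split_ifs with h h' h'
        all_goals simp_all
        all_goals ring_nf
    · by_cases h : 2 ≤ (pvDs valid t).length
      · rw [if_pos h]
        simp only [if_pos (show decide (2 ≤ (pvDs valid t).length) = true by simpa using h)]
        simp
      · rw [if_neg h]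
        simp only [if_neg (show ¬ (decide (2 ≤ (pvDs valid t).length) = true) by simpa using h)]
        simp

lemma foldl_union_eq (ts : List (List String)) : ∀ (s : PySem.Set String),
    ts.foldl (fun a t => PySem.Set.union a t) s = PySem.Set.update s ts.flatten := by
  induction ts with
  | nil => intro s; simp [PySem.Set.update]
  | cons t ts ih =>
    intro s
    rw [List.foldl_cons, ih, List.flatten_cons, PySem.Set.update_append]
    rfl

lemma unique_eq (cleaned : List (List String)) :
    (if cleaned = [] then (PySem.Set.empty : PySem.Set String) else cleaned.foldl (fun s t => PySem.Set.union s t) PySem.Set.empty) = PySem.Set.ofList cleaned.flatten := by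
  by_cases h : cleaned = []
  · subst h; rfl
  · rw [if_neg h, foldl_union_eq]
    exact PySem.Set.update_nil_left _

lemma mkRep_items3 (n e s dp inv a b c : Int) :
    ((((mkRep n e s dp inv).insert "total_transactions_after" a).insert "total_items_after" b).insert "unique_products_after" c).items =
    [("total_transactions_before", n), ("empty_transactions", e), ("single_item_transactions", s), ("duplicate_items_instances", dp), ("invalid_items_instances", inv), ("total_transactions_after", a), ("total_items_after", b), ("unique_products_after", c)] := rfl

-- ===== VERDICT (by name: the statement is the Claim_ definition above) =====
theorem preprocess_transactions_spec : Claim_equal_preprocess_transactions := by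
  intro raw valid _
  unfold Spec_preprocess_transactions preprocess_transactions preprocess_transactions_alt
  dsimp only
  rw [show ((((PySem.Dict.empty.insert "total_transactions_before" ((raw.length : Int))).insert "empty_transactions" 0).insert "single_item_transactions" 0).insert "duplicate_items_instances" 0).insert "invalid_items_instances" 0 = mkRep (raw.length : Int) 0 0 0 0 from rfl]
  rw [outerA_char valid raw (raw.length : Int) 0 0 0 0 []]
  have hnorm : raw.map (fun t => (t.map (fun i => PySem.Str.lower (PySem.Str.strip i))).filter (fun c => c ≠ "")) = raw.map pvCs := by
    simp [pvCs, pvCleanA_eq]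
  have hvl : (raw.map pvCs).map (fun t => t.filter (fun x => x ∈ valid)) = raw.map (pvVs valid) := by
    simp [pvVs, Function.comp]
  have hdl : (raw.map (pvVs valid)).map PySem.List.dedup = raw.map (pvDs valid) := by
    simp [pvDs, Function.comp]
  simp only [hnorm, hvl, hdl, List.nil_append]
  rw [mkRep_items3, unique_eq]
  simp only [PySem.List.count_eq, zero_add, List.map_map, Function.comp_def]
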